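-- pv_equiv track=rewrite | github.com/PerchunPak/nixpkgs-updaters-library | nupd/utils.py | cleanup_raw_string
-- ===== SOURCE A (Python) =====
-- import typing as t
--
-- def cleanup_raw_string(arg: str | t.Any) -> str:
--     """Clean up some common unnecessary symbols like leading/trailing spaces.
--
--     Basically this tries to make a string, that is compatible with `meta.description`
--     in https://github.com/NixOS/nixpkgs/tree/master/pkgs#meta-attributes.
--     """
--     # for scripting easibility, if it is not a string, just return it.
--     # this allows us to use this function as a pydantic "before" validator
--     # on e.g. optional values
--     if not isinstance(arg, str):
--         return arg
--     result = arg.strip().strip(".")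
--     # capitalize first letter
--     result = result[:1].upper() + result[1:]
--     result = result.removeprefix("The ").removeprefix("A ")
--
--     if result == arg:
--         return result
--     return cleanup_raw_string(result)
-- ===== SOURCE B (Python) =====
-- def _normalize_once(s):
--     s = s.strip().strip(".")
--     if s:
--         s = s[0].upper() + s[1:]
--     for prefix in ("The ", "A "):
--         if s.startswith(prefix):
--             s = s[len(prefix):]
--     return s
--
--
-- def cleanup_raw_string(arg):
--     if not isinstance(arg, str):
--         return arg
--     current = arg
--     while True:
--         result = _normalize_once(current)
--         if result == current:
--             return result
--         current = result
-- ===== Notes on version B (the rewrite author's own statement) =====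
-- stated objective: idiomatic
-- what changed: A's tail self-recursion is replaced by an explicit while-True fixpoint loop over a `current` variable, with the single normalization pass (full strip, first-letter uppercase via indexing instead of slice concatenation, prefix removal via a startswith/slice loop over the prefixes instead of chained removeprefix) factored into a helper.
import Mathlib
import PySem

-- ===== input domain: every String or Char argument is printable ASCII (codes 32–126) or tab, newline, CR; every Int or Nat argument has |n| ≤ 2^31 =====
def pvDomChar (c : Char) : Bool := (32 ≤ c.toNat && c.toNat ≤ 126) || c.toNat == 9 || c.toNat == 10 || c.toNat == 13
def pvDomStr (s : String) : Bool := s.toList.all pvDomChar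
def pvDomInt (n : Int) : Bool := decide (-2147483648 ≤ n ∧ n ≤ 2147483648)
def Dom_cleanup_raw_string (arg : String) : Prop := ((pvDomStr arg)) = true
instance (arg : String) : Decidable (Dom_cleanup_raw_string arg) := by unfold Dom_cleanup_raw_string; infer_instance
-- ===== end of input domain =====

-- B rewrites A's tail self-recursion as an explicit iterative fixpoint loop with the
-- per-pass normalization factored into a helper (idiomatic; same cost).

-- ===== PORT A =====
-- one body of A: strip, strip('.'), capitalize first letter via slices, the two removeprefix calls
-- (removeprefix p = drop |p| if startswith p, else unchanged — exact).
def pvPassA (s : List Char) : List Char :=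
  let r1 := PySem.Chars.stripChars (PySem.Chars.strip s) ['.']
  let r2 := PySem.Chars.upper (PySem.List.slice r1 none (some 1)) ++ PySem.List.slice r1 (some 1) none
  let r3 := if PySem.Chars.startswith r2 "The ".toList then r2.drop 4 else r2
  if PySem.Chars.startswith r3 "A ".toList then r3.drop 2 else r3

-- A's self-recursion, made total with fuel (|arg| + 2 suffices: each changing pass
-- shortens the string except at most one capitalization-only pass).
def pvRecA : Nat → List Char → List Char
  | 0, s => s
  | n + 1, s =>
    let result := pvPassA s
    if result = s then result else pvRecA n result

def cleanup_raw_string (arg : String) : String :=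
  String.ofList (pvRecA (arg.toList.length + 2) arg.toList)

-- ===== PORT B =====
-- _normalize_once from Source B
def pvNormalizeOnce (s : List Char) : List Char :=
  let s1 := PySem.Chars.stripChars (PySem.Chars.strip s) ['.']
  let s2 := match s1 with
            | [] => s1
            | c :: rest => PySem.Chars.upperChar c :: rest
  ["The ".toList, "A ".toList].foldl
    (fun acc p => if PySem.Chars.startswith acc p then acc.drop p.length else acc) s2

-- the `while True` fixpoint loop of Source B, made total with fuel (|arg| + 2 suffices, as above)
def pvLoopB (current : List Char) : Nat → List Char
  | 0 => current
  | n + 1 =>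
    let result := pvNormalizeOnce current
    if result = current then result else pvLoopB result n

def cleanup_raw_string_alt (arg : String) : String :=
  String.ofList (pvLoopB arg.toList (arg.toList.length + 2))

-- ===== PRECONDITION & SPEC =====
def Spec_cleanup_raw_string (arg : String) (out : String) : Prop := out = cleanup_raw_string_alt arg
instance (arg : String) (out : String) : Decidable (Spec_cleanup_raw_string arg out) := by unfold Spec_cleanup_raw_string; infer_instance

-- ===== CLAIM (what is proved, stated in full; the proofs are below) =====
def Claim_equal_cleanup_raw_string : Prop := ∀ (arg : String), Dom_cleanup_raw_string arg → Spec_cleanup_raw_string arg (cleanup_raw_string arg)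

-- ===== LEMMAS AND PROOFS =====

-- the two per-pass normalizations agree
theorem pvPass_eq (s : List Char) : pvPassA s = pvNormalizeOnce s := by
  unfold pvPassA pvNormalizeOnce
  cases h : PySem.Chars.stripChars (PySem.Chars.strip s) ['.'] with
  | nil => simp [PySem.Chars.upper, PySem.List.slice_to, PySem.List.slice_from, List.foldl,
      PySem.Chars.startswith]
  | cons c rest =>
    simp [PySem.Chars.upper, PySem.List.slice_to, PySem.List.slice_from, List.foldl,
      PySem.Chars.upperChar]

theorem pvRec_eq_loop (n : Nat) (s : List Char) : pvRecA n s = pvLoopB s n := by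
  induction n generalizing s with
  | zero => rfl
  | succ n ih =>
    simp only [pvRecA, pvLoopB, pvPass_eq]
    split <;> simp [ih]

-- ===== VERDICT (by name: the statement is the Claim_ definition above) =====
theorem cleanup_raw_string_spec : Claim_equal_cleanup_raw_string := by
  intro arg _
  unfold Spec_cleanup_raw_string cleanup_raw_string cleanup_raw_string_alt
  rw [pvRec_eq_loop]
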